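-- pv_equiv track=rewrite | github.com/1712162/Path-Finding-Algorithm-School-Project | project1/Graph2D.py | polygon_limit
-- ===== SOURCE A (Python) =====
-- def polygon_limit(polygon,orientation):
--   xy_of_polygon=[]
--   for i in polygon:
--     x,y=i
--     if(orientation==1):
--       xy_of_polygon.append(x)
--     else:
--       xy_of_polygon.append(y)
--   min_xy_of_polygon=min(xy_of_polygon)
--   max_xy_of_polygon=max(xy_of_polygon)
--   return (min_xy_of_polygon,max_xy_of_polygon)
-- ===== SOURCE B (Python) =====
-- def polygon_limit(polygon, orientation):
--     it = iter(polygon)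
--     p = next(it)
--     lo = hi = p[0] if orientation == 1 else p[1]
--     for p in it:
--         c = p[0] if orientation == 1 else p[1]
--         if c < lo:
--             lo = c
--         elif c > hi:
--             hi = c
--     return (lo, hi)
-- ===== Notes on version B (the rewrite author's own statement) =====
-- stated objective: simpler
-- what changed: B makes one pass maintaining running lo/hi seeded from the first point instead of building an intermediate coordinate list and scanning it twice with min() and max().
import Mathlib
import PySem

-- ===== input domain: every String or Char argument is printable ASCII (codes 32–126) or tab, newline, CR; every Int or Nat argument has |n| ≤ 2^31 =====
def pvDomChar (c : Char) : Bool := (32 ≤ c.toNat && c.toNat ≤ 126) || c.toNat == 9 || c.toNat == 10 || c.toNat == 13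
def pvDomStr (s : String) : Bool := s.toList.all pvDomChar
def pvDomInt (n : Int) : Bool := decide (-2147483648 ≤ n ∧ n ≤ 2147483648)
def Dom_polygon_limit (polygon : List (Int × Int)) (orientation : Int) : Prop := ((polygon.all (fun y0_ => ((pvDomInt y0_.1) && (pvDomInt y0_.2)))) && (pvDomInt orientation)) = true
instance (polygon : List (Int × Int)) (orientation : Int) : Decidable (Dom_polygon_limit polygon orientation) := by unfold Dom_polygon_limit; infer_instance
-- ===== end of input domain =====

-- ===== PORT A =====
def polygon_limit (polygon : List (Int × Int)) (orientation : Int) : Int × Int :=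
  let xy_of_polygon := polygon.foldl
    (fun acc i => if orientation = 1 then acc ++ [i.1] else acc ++ [i.2]) []
  -- min()/max() on an empty list raise ValueError in Python; Pre_ excludes polygon = []
  match PySem.List.min? xy_of_polygon (fun v => v), PySem.List.max? xy_of_polygon (fun v => v) with
  | some mn, some mx => (mn, mx)
  | _, _ => (0, 0)

-- ===== PORT B =====
def polygon_limit_alt (polygon : List (Int × Int)) (orientation : Int) : Int × Int :=
  -- B: single pass with running lo/hi seeded from the first point; next() on empty raises, Pre_ excludes []
  match polygon with
  | [] => (0, 0)
  | p :: rest =>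
    let c0 := if orientation = 1 then p.1 else p.2
    rest.foldl (fun s q =>
      let c := if orientation = 1 then q.1 else q.2
      if c < s.1 then (c, s.2) else if c > s.2 then (s.1, c) else s) (c0, c0)

-- ===== PRECONDITION & SPEC =====
-- Pre_ excludes only the empty polygon, on which A raises ValueError (min of empty sequence).
def Pre_polygon_limit (polygon : List (Int × Int)) (orientation : Int) : Prop := polygon ≠ []
instance (polygon : List (Int × Int)) (orientation : Int) : Decidable (Pre_polygon_limit polygon orientation) := by unfold Pre_polygon_limit; infer_instance
def pvWitness_polygon_limit : (List (Int × Int)) × Int := ([(1, 2), (3, -4)], 1)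
def Spec_polygon_limit (polygon : List (Int × Int)) (orientation : Int) (out : Int × Int) : Prop := out = polygon_limit_alt polygon orientation
instance (polygon : List (Int × Int)) (orientation : Int) (out : Int × Int) : Decidable (Spec_polygon_limit polygon orientation out) := by unfold Spec_polygon_limit; infer_instance

-- ===== CLAIM (what is proved, stated in full; the proofs are below) =====
def Claim_equal_polygon_limit : Prop := ∀ (polygon : List (Int × Int)) (orientation : Int), Dom_polygon_limit polygon orientation → Pre_polygon_limit polygon orientation → Spec_polygon_limit polygon orientation (polygon_limit polygon orientation)

-- ===== LEMMAS AND PROOFS =====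

theorem pv_foldl_append_sel (polygon : List (Int × Int)) (orientation : Int) (acc : List Int) :
    polygon.foldl (fun acc i => if orientation = 1 then acc ++ [i.1] else acc ++ [i.2]) acc
      = acc ++ polygon.map (fun q => if orientation = 1 then q.1 else q.2) := by
  induction polygon generalizing acc with
  | nil => simp
  | cons p t ih => simp only [List.foldl_cons, List.map_cons, ih]; split <;> simp

theorem pv_minmax_loop (orientation : Int) (t : List (Int × Int)) :
    ∀ lo hi : Int, lo ≤ hi →
    t.foldl (fun s q =>
      let c := if orientation = 1 then q.1 else q.2
      if c < s.1 then (c, s.2) else if c > s.2 then (s.1, c) else s) (lo, hi)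
      = ((t.map (fun q => if orientation = 1 then q.1 else q.2)).foldl min lo,
         (t.map (fun q => if orientation = 1 then q.1 else q.2)).foldl max hi) := by
  induction t with
  | nil => intro lo hi _; simp
  | cons q t ih =>
    intro lo hi hle
    simp only [List.foldl_cons, List.map_cons]
    set c := if orientation = 1 then q.1 else q.2 with hc
    by_cases h1 : c < lo
    · have : min lo c = c := by omega
      have h2 : max hi c = hi := by omega
      simp only [if_pos h1, this, h2]
      exact ih c hi (by omega)
    · by_cases h2 : c > hi
      · have hm : min lo c = lo := by omega
        have hM : max hi c = c := by omega
        simp only [if_neg h1, if_pos h2, hm, hM]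
        exact ih lo c (by omega)
      · have hm : min lo c = lo := by omega
        have hM : max hi c = hi := by omega
        simp only [if_neg h1, if_neg h2, hm, hM]
        exact ih lo hi hle

-- ===== VERDICT (by name: the statement is the Claim_ definition above) =====
theorem polygon_limit_spec : Claim_equal_polygon_limit := by
  intro polygon orientation _ hpre
  unfold Spec_polygon_limit polygon_limit polygon_limit_alt
  match polygon with
  | [] => exact absurd rfl hpre
  | p :: t =>
    simp only [pv_foldl_append_sel, List.nil_append, List.map_cons,
      PySem.List.min?_id_cons, PySem.List.max?_id_cons]
    rw [pv_minmax_loop orientation t _ _ le_rfl, List.foldl_map, List.foldl_map]
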